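-- pv_equiv track=rewrite | github.com/wooseokCho/ps_study | 정선/python/programmers/퍼즐조각맞추기.py | rotate_part
-- ===== SOURCE A (Python) =====
-- import copy
--
-- def rotate_part(part) :
--     length = max(max(part))
--
--     rotated_part = copy.deepcopy(part)
--     rotated_parts = []
--
--     for i in range(4) :
--         rotated_part = [[p[1], length - p[0] - 1] for p in rotated_part]
--         rotated_parts.append(rotated_part)
--     return rotated_parts
-- ===== SOURCE B (Python) =====
-- def rotate_part(part):
--     length = max(max(part))
--     rot1 = [[p[1], length - p[0] - 1] for p in part]
--     rot2 = [[length - p[0] - 1, length - p[1] - 1] for p in part]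
--     rot3 = [[length - p[1] - 1, p[0]] for p in part]
--     rot4 = [[p[0], p[1]] for p in part]
--     return [rot1, rot2, rot3, rot4]
-- ===== Notes on version B (the rewrite author's own statement) =====
-- stated objective: simpler
-- what changed: B replaces A's iterative accumulation (applying the one-step rotation map 4 times to a mutated copy) with four independent closed-form comprehensions over the original coordinates (T, T^2, T^3, T^4=identity), no deepcopy and no loop.
import Mathlib
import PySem

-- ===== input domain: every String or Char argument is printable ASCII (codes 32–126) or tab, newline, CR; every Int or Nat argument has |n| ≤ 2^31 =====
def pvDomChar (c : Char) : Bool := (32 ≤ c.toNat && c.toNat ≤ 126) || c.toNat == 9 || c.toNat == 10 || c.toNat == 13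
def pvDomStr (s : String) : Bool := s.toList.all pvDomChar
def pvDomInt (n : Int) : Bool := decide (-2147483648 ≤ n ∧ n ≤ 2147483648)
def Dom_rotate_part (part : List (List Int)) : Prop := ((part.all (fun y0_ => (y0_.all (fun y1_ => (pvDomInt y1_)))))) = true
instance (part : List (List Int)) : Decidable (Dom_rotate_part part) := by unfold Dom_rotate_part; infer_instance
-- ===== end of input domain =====

-- B builds the four rotations as independent closed-form comprehensions (T, T², T³, T⁴=id)
-- instead of A's iterative re-application of the one-step map; same cost, simpler.

-- ===== PORT A =====
-- Python's lexicographic `<` on lists of ints (used by max(part))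
def pvLexLt : List Int → List Int → Bool
  | _, [] => false
  | [], _ :: _ => true
  | a :: as_, b :: bs => if a < b then true else if b < a then false else pvLexLt as_ bs

-- Python max(seq): first element, replaced whenever a later one is strictly greater
def pvMaxRow (h : List Int) (t : List (List Int)) : List Int :=
  t.foldl (fun cur x => if pvLexLt cur x then x else cur) h

def pvMaxInt (h : Int) (t : List Int) : Int :=
  t.foldl (fun cur x => if cur < x then x else cur) h

-- one step of A's loop body: [[p[1], length - p[0] - 1] for p in rotated_part]
def pvStep (length : Int) (rp : List (List Int)) : List (List Int) :=
  rp.map (fun p => [(PySem.List.pyGet? p 1).getD 0, length - (PySem.List.pyGet? p 0).getD 0 - 1])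

def rotate_part (part : List (List Int)) : List (List (List Int)) :=
  let length : Int :=
    match part with
    | [] => 0   -- Python raises ValueError here; excluded by Pre_
    | h :: t =>
      match pvMaxRow h t with
      | [] => 0   -- Python raises ValueError here; excluded by Pre_
      | mh :: mt => pvMaxInt mh mt
  -- for i in range(4): rotated_part = step(rotated_part); rotated_parts.append(rotated_part)
  ((PySem.List.pyRange 0 4 1).foldl
    (fun (st : List (List Int) × List (List (List Int))) _ =>
      let rp := pvStep length st.1
      (rp, st.2 ++ [rp]))
    (part, [])).2

-- ===== PORT B =====
def rotate_part_alt (part : List (List Int)) : List (List (List Int)) :=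
  let length : Int :=
    match part with
    | [] => 0
    | h :: t =>
      match pvMaxRow h t with
      | [] => 0
      | mh :: mt => pvMaxInt mh mt
  let g0 : List Int → Int := fun p => (PySem.List.pyGet? p 0).getD 0
  let g1 : List Int → Int := fun p => (PySem.List.pyGet? p 1).getD 0
  let rot1 := part.map (fun p => [g1 p, length - g0 p - 1])
  let rot2 := part.map (fun p => [length - g0 p - 1, length - g1 p - 1])
  let rot3 := part.map (fun p => [length - g1 p - 1, g0 p])
  let rot4 := part.map (fun p => [g0 p, g1 p])
  [rot1, rot2, rot3, rot4]

-- ===== PRECONDITION & SPEC =====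
-- Pre_ excludes exactly the inputs where A raises: empty part (ValueError from max)
-- and rows with fewer than two entries (IndexError from p[1]).
def Pre_rotate_part (part : List (List Int)) : Prop :=
  part ≠ [] ∧ ∀ p ∈ part, 2 ≤ p.length
instance (part : List (List Int)) : Decidable (Pre_rotate_part part) := by
  unfold Pre_rotate_part; infer_instance

def pvWitness_rotate_part : List (List Int) := [[1, 0], [0, 1]]

def Spec_rotate_part (part : List (List Int)) (out : List (List (List Int))) : Prop := out = rotate_part_alt part
instance (part : List (List Int)) (out : List (List (List Int))) : Decidable (Spec_rotate_part part out) := by unfold Spec_rotate_part; infer_instance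

-- ===== CLAIM (what is proved, stated in full; the proofs are below) =====
def Claim_equal_rotate_part : Prop := ∀ (part : List (List Int)), Dom_rotate_part part → Pre_rotate_part part → Spec_rotate_part part (rotate_part part)

-- ===== LEMMAS AND PROOFS =====

theorem pvStep_map (L : Int) (part : List (List Int)) (f g : List Int → Int) :
    pvStep L (part.map (fun p => [f p, g p])) =
      part.map (fun p => [g p, L - f p - 1]) := by
  simp [pvStep, List.map_map, PySem.List.pyGet?, PySem.List.pyIdx?]

-- A's fold over range(4) unrolled to four applications of pvStep
theorem rotate_part_eq_steps (part : List (List Int)) :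
    rotate_part part =
      let L :=
        match part with
        | [] => 0
        | h :: t =>
          match pvMaxRow h t with
          | [] => 0
          | mh :: mt => pvMaxInt mh mt
      [pvStep L part, pvStep L (pvStep L part), pvStep L (pvStep L (pvStep L part)),
       pvStep L (pvStep L (pvStep L (pvStep L part)))] := by
  have h4 : PySem.List.pyRange 0 4 1 = [0, 1, 2, 3] := by decide
  simp [rotate_part, h4, List.foldl]

-- ===== VERDICT (by name: the statement is the Claim_ definition above) =====
theorem rotate_part_spec : Claim_equal_rotate_part := by
  intro part _hDom hPre
  unfold Spec_rotate_part
  rw [rotate_part_eq_steps]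
  unfold rotate_part_alt
  simp only []
  set L :=
    (match part with
     | [] => (0 : Int)
     | h :: t =>
       match pvMaxRow h t with
       | [] => 0
       | mh :: mt => pvMaxInt mh mt) with hL
  have h1 : pvStep L part =
      part.map (fun p => [(PySem.List.pyGet? p 1).getD 0, L - (PySem.List.pyGet? p 0).getD 0 - 1]) := rfl
  have h2 := pvStep_map L part (fun p => (PySem.List.pyGet? p 1).getD 0)
      (fun p => L - (PySem.List.pyGet? p 0).getD 0 - 1)
  have h3 := pvStep_map L part (fun p => L - (PySem.List.pyGet? p 0).getD 0 - 1)
      (fun p => L - (PySem.List.pyGet? p 1).getD 0 - 1)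
  have h4 := pvStep_map L part (fun p => L - (PySem.List.pyGet? p 1).getD 0 - 1)
      (fun p => L - (L - (PySem.List.pyGet? p 0).getD 0 - 1) - 1)
  simp only [h1, h2, h3, h4]
  simp only [List.cons.injEq, and_true]
  refine ⟨?_, ?_, ?_, ?_⟩ <;>
    first
    | trivial
    | · refine List.map_congr_left ?_
        intro p _hp
        simp only [List.cons.injEq, and_true]
        constructor <;> first | trivial | omega
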